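-- pv_equiv track=rewrite | github.com/BrettKinny/dotty-stackchan | dances.py | _color_party
-- ===== SOURCE A (Python) =====
-- HEAD = "head"
--
-- LED = "led"
--
-- _RAINBOW = [
--     (168, 0, 0), (168, 80, 0), (168, 168, 0), (0, 168, 0),
--     (0, 168, 168), (0, 0, 168), (100, 0, 168), (168, 0, 168),
-- ]
--
-- def _color_party(beat_ms: int, duration_ms: int) -> list[tuple[int, str, dict]]:
--     """Lively yaw + cycling rainbow LEDs every 2 beats; pitch nod every 4."""
--     timeline: list[tuple[int, str, dict]] = []
--     n_beats = max(1, duration_ms // beat_ms)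
--     for i in range(n_beats):
--         t = i * beat_ms
--         # Yaw oscillates each beat; widening sweep on every 4th beat.
--         if i % 4 == 3:
--             timeline.append((t, HEAD, {"yaw": -60 if i % 8 < 4 else 60, "pitch": 50, "speed": 500}))
--         else:
--             yaw = (-30, 30, -45, 45)[i % 4]
--             timeline.append((t, HEAD, {"yaw": yaw, "pitch": 25, "speed": 350}))
--         if i % 2 == 0:
--             r, g, b = _RAINBOW[(i // 2) % len(_RAINBOW)]
--             timeline.append((t, LED, {"r": r, "g": g, "b": b}))
--     timeline.append((duration_ms, HEAD, {"yaw": 0, "pitch": 0, "speed": 200}))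
--     timeline.append((duration_ms, LED, {"r": 0, "g": 0, "b": 0}))
--     return timeline
-- ===== SOURCE B (Python) =====
-- HEAD = "head"
--
-- LED = "led"
--
-- _RAINBOW = [
--     (168, 0, 0), (168, 80, 0), (168, 168, 0), (0, 168, 0),
--     (0, 168, 168), (0, 0, 168), (100, 0, 168), (168, 0, 168),
-- ]
--
-- def _head_pose(i):
--     if i % 4 == 3:
--         return {"yaw": -60 if i % 8 < 4 else 60, "pitch": 50, "speed": 500}
--     return {"yaw": (-30, 30, -45, 45)[i % 4], "pitch": 25, "speed": 350}
--
-- def _led_event(beat_ms, i):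
--     r, g, b = _RAINBOW[(i // 2) % len(_RAINBOW)]
--     return (i, (i * beat_ms, LED, {"r": r, "g": g, "b": b}))
--
-- def _color_party(beat_ms: int, duration_ms: int) -> list:
--     """Two independent tracks (HEAD / LED), built in separate passes and
--     merged by beat index with HEAD before LED at equal times."""
--     n_beats = max(1, duration_ms // beat_ms)
--     head = [(i * beat_ms, HEAD, _head_pose(i)) for i in range(n_beats)]
--     head.append((duration_ms, HEAD, {"yaw": 0, "pitch": 0, "speed": 200}))
--     led = []
--     for i in range(n_beats):
--         if i % 2 == 0:
--             led.append(_led_event(beat_ms, i))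
--     led.append((n_beats, (duration_ms, LED, {"r": 0, "g": 0, "b": 0})))
--     out = []
--     j = 0
--     for i, ev in enumerate(head):
--         out.append(ev)
--         if j < len(led) and led[j][0] == i:
--             out.append(led[j][1])
--             j += 1
--     return out
-- ===== Notes on version B (the rewrite author's own statement) =====
-- stated objective: alternative
-- what changed: Instead of one loop interleaving HEAD and LED appends per beat, B builds the HEAD track and the LED track in two independent passes (each with its own terminator) and then merges them by beat index, HEAD before LED at equal times.
import Mathlib
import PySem

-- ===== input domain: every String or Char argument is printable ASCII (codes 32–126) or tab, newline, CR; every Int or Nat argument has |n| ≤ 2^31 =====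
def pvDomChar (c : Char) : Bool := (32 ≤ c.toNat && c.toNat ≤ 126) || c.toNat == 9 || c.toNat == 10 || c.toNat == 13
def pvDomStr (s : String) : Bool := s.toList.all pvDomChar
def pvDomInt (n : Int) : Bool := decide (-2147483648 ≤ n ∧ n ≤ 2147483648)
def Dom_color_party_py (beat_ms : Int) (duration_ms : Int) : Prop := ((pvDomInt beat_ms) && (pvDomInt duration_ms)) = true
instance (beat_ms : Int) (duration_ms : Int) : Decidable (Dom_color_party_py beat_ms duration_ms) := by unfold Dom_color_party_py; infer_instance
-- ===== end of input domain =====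

-- B builds the HEAD and LED tracks in two separate passes and merges them by beat index
-- (HEAD before LED at equal times); same cost, different decomposition ("alternative").

-- ===== PORT A =====
def pvRainbow : List (Int × Int × Int) :=
  [(168, 0, 0), (168, 80, 0), (168, 168, 0), (0, 168, 0),
   (0, 168, 168), (0, 0, 168), (100, 0, 168), (168, 0, 168)]

def color_party_py (beat_ms : Int) (duration_ms : Int) : List (Int × String × (List (String × Int))) :=
  let n_beats := max 1 (PySem.Int.floordiv duration_ms beat_ms)
  let timeline := (PySem.List.pyRange 0 n_beats 1).foldl (fun tl i =>
    let t := i * beat_ms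
    let tl :=
      if PySem.Int.mod i 4 = 3 then
        tl ++ [(t, "head", [("yaw", if PySem.Int.mod i 8 < 4 then -60 else 60), ("pitch", 50), ("speed", 500)])]
      else
        -- tuple index (-30,30,-45,45)[i%4]; i%4 ∈ {0,1,2} here so the default is never used
        let yaw := PySem.List.pyGetD [-30, 30, -45, 45] (PySem.Int.mod i 4) 0
        tl ++ [(t, "head", [("yaw", yaw), ("pitch", 25), ("speed", 350)])]
    if PySem.Int.mod i 2 = 0 then
      -- _RAINBOW[(i//2) % 8]; the index is in range so the default is never used
      let rgb := PySem.List.pyGetD pvRainbow (PySem.Int.mod (PySem.Int.floordiv i 2) 8) (0, 0, 0)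
      tl ++ [(t, "led", [("r", rgb.1), ("g", rgb.2.1), ("b", rgb.2.2)])]
    else tl) []
  timeline ++ [(duration_ms, "head", [("yaw", 0), ("pitch", 0), ("speed", 200)])]
           ++ [(duration_ms, "led", [("r", 0), ("g", 0), ("b", 0)])]

-- ===== PORT B =====
def head_pose (i : Int) : List (String × Int) :=
  if PySem.Int.mod i 4 = 3 then
    [("yaw", if PySem.Int.mod i 8 < 4 then -60 else 60), ("pitch", 50), ("speed", 500)]
  else
    [("yaw", PySem.List.pyGetD [-30, 30, -45, 45] (PySem.Int.mod i 4) 0), ("pitch", 25), ("speed", 350)]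

def ledEv (beat_ms i : Int) : Int × (Int × String × (List (String × Int))) :=
  let rgb := PySem.List.pyGetD pvRainbow (PySem.Int.mod (PySem.Int.floordiv i 2) 8) (0, 0, 0)
  (i, (i * beat_ms, "led", [("r", rgb.1), ("g", rgb.2.1), ("b", rgb.2.2)]))

-- Source B's final loop: `for i, ev in enumerate(head): out.append(ev); if led[j][0]==i: out.append(...); j+=1`
def mergeTracks (i : Int) (head : List (Int × String × (List (String × Int))))
    (led : List (Int × (Int × String × (List (String × Int))))) :
    List (Int × String × (List (String × Int))) :=
  match head, led with
  | [], _ => []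
  | ev :: hs, (k, le) :: rest =>
      if k = i then ev :: le :: mergeTracks (i + 1) hs rest
      else ev :: mergeTracks (i + 1) hs ((k, le) :: rest)
  | ev :: hs, [] => ev :: mergeTracks (i + 1) hs []

def color_party_py_alt (beat_ms : Int) (duration_ms : Int) : List (Int × String × (List (String × Int))) :=
  let n_beats := max 1 (PySem.Int.floordiv duration_ms beat_ms)
  let head := ((PySem.List.pyRange 0 n_beats 1).map (fun i => (i * beat_ms, "head", head_pose i)))
              ++ [(duration_ms, "head", [("yaw", 0), ("pitch", 0), ("speed", 200)])]
  let led := ((PySem.List.pyRange 0 n_beats 1).foldl (fun acc i =>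
      if PySem.Int.mod i 2 = 0 then acc ++ [ledEv beat_ms i] else acc) [])
    ++ [(n_beats, (duration_ms, "led", [("r", 0), ("g", 0), ("b", 0)]))]
  mergeTracks 0 head led

-- ===== PRECONDITION & SPEC =====
-- Pre_ excludes beat_ms = 0, on which Python A raises ZeroDivisionError (B raises there too).
def Pre_color_party_py (beat_ms : Int) (duration_ms : Int) : Prop := beat_ms ≠ 0
instance (beat_ms : Int) (duration_ms : Int) : Decidable (Pre_color_party_py beat_ms duration_ms) := by unfold Pre_color_party_py; infer_instance
def pvWitness_color_party_py : Int × Int := (100, 350)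

def Spec_color_party_py (beat_ms : Int) (duration_ms : Int) (out : List (Int × String × (List (String × Int)))) : Prop := out = color_party_py_alt beat_ms duration_ms
instance (beat_ms : Int) (duration_ms : Int) (out : List (Int × String × (List (String × Int)))) : Decidable (Spec_color_party_py beat_ms duration_ms out) := by unfold Spec_color_party_py; infer_instance

-- ===== CLAIM (what is proved, stated in full; the proofs are below) =====
def Claim_equal_color_party_py : Prop := ∀ (beat_ms : Int) (duration_ms : Int), Dom_color_party_py beat_ms duration_ms → Pre_color_party_py beat_ms duration_ms → Spec_color_party_py beat_ms duration_ms (color_party_py beat_ms duration_ms)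

-- ===== LEMMAS AND PROOFS =====

-- the per-beat segment A emits for beat i
def seg (beat_ms i : Int) : List (Int × String × (List (String × Int))) :=
  (i * beat_ms, "head", head_pose i) ::
    (if PySem.Int.mod i 2 = 0 then [(ledEv beat_ms i).2] else [])

lemma merge_main (beat_ms : Int) (tH tL : Int × String × (List (String × Int))) :
    ∀ (m : Nat) (a : Int),
    mergeTracks a
      ((PySem.List.pyRange a (a + m) 1).map (fun i => (i * beat_ms, "head", head_pose i)) ++ [tH])
      (((PySem.List.pyRange a (a + m) 1).filter (fun i => decide (PySem.Int.mod i 2 = 0))).map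
         (fun i => ledEv beat_ms i) ++ [(a + m, tL)])
    = (PySem.List.pyRange a (a + m) 1).flatMap (seg beat_ms) ++ [tH, tL] := by
  intro m
  induction m with
  | zero =>
      intro a
      simp [mergeTracks]
  | succ m ih =>
      intro a
      have hcons : PySem.List.pyRange a (a + (m + 1 : Nat)) 1 = a :: PySem.List.pyRange (a + 1) (a + (m + 1 : Nat)) 1 :=
        PySem.List.pyRange_one_cons (by push_cast; omega)
      have hshift : a + ((m : Int) + 1) = (a + 1) + (m : Int) := by ring
      by_cases h2 : PySem.Int.mod a 2 = 0
      · rw [hcons]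
        simp only [List.map_cons, List.filter_cons, h2, decide_true, if_true,
          List.flatMap_cons, List.cons_append, List.map_cons]
        have hpair : ledEv beat_ms a = (a, (ledEv beat_ms a).2) := rfl
        rw [hpair, mergeTracks, if_pos rfl]
        push_cast
        rw [hshift, ih (a + 1)]
        simp only [seg, if_pos h2]
        simp
      · rw [hcons]
        simp only [List.map_cons, List.filter_cons, h2, decide_false,
          List.flatMap_cons, List.cons_append]
        push_cast
        rw [hshift]
        set L := ((PySem.List.pyRange (a + 1) ((a + 1) + (m : Int)) 1).filter
            (fun i => decide (PySem.Int.mod i 2 = 0))).map (fun i => ledEv beat_ms i)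
            ++ [((a + 1) + (m : Int), tL)] with hLdef
        have hne : L ≠ [] := by simp [hLdef]
        obtain ⟨⟨k, le⟩, rest, hL⟩ := List.exists_cons_of_ne_nil hne
        have hk : a < k := by
          have hmem : (k, le) ∈ L := by rw [hL]; exact List.mem_cons_self
          rw [hLdef] at hmem
          rcases List.mem_append.mp hmem with h | h
          · obtain ⟨i, hi, hEq⟩ := List.mem_map.mp h
            have hi' := List.mem_filter.mp hi
            have := (PySem.List.mem_pyRange_one).mp hi'.1
            have hk' : k = i := by
              have := congrArg Prod.fst hEq
              simpa [ledEv] using this.symm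
            omega
          · have : k = (a + 1) + (m : Int) := by
              have := List.mem_singleton.mp h
              exact (congrArg Prod.fst this)
            omega
        rw [hL, mergeTracks, if_neg (by omega), ← hL, ih (a + 1)]
        simp only [seg, if_neg h2]
        simp

lemma foldlA_eq (beat_ms : Int) (l : List Int) (acc : List (Int × String × (List (String × Int)))) :
    l.foldl (fun tl i =>
      let t := i * beat_ms
      let tl :=
        if PySem.Int.mod i 4 = 3 then
          tl ++ [(t, "head", [("yaw", if PySem.Int.mod i 8 < 4 then -60 else 60), ("pitch", 50), ("speed", 500)])]
        else
          let yaw := PySem.List.pyGetD [-30, 30, -45, 45] (PySem.Int.mod i 4) 0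
          tl ++ [(t, "head", [("yaw", yaw), ("pitch", 25), ("speed", 350)])]
      if PySem.Int.mod i 2 = 0 then
        let rgb := PySem.List.pyGetD pvRainbow (PySem.Int.mod (PySem.Int.floordiv i 2) 8) (0, 0, 0)
        tl ++ [(t, "led", [("r", rgb.1), ("g", rgb.2.1), ("b", rgb.2.2)])]
      else tl) acc = acc ++ l.flatMap (seg beat_ms) := by
  have h : (fun (tl : List (Int × String × (List (String × Int)))) (i : Int) =>
      let t := i * beat_ms
      let tl :=
        if PySem.Int.mod i 4 = 3 then
          tl ++ [(t, "head", [("yaw", if PySem.Int.mod i 8 < 4 then -60 else 60), ("pitch", 50), ("speed", 500)])]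
        else
          let yaw := PySem.List.pyGetD [-30, 30, -45, 45] (PySem.Int.mod i 4) 0
          tl ++ [(t, "head", [("yaw", yaw), ("pitch", 25), ("speed", 350)])]
      if PySem.Int.mod i 2 = 0 then
        let rgb := PySem.List.pyGetD pvRainbow (PySem.Int.mod (PySem.Int.floordiv i 2) 8) (0, 0, 0)
        tl ++ [(t, "led", [("r", rgb.1), ("g", rgb.2.1), ("b", rgb.2.2)])]
      else tl)
      = fun tl i => tl ++ seg beat_ms i := by
    funext tl i
    simp only [seg, head_pose, ledEv]
    split_ifs <;> simp
  rw [h, PySem.List.foldl_append_eq_flatMap]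

lemma foldlB_eq (beat_ms : Int) (l : List Int) :
    l.foldl (fun acc i =>
      if PySem.Int.mod i 2 = 0 then acc ++ [ledEv beat_ms i] else acc) []
    = (l.filter (fun i => decide (PySem.Int.mod i 2 = 0))).map (fun i => ledEv beat_ms i) := by
  have := PySem.List.foldl_append_ite (l := l)
    (p := fun i => PySem.Int.mod i 2 = 0) (f := fun i => ledEv beat_ms i) (acc := ([] : List (Int × (Int × String × (List (String × Int))))))
  simpa using this

-- ===== VERDICT (by name: the statement is the Claim_ definition above) =====
theorem color_party_py_spec : Claim_equal_color_party_py := by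
  intro beat_ms duration_ms _ _
  unfold Spec_color_party_py color_party_py color_party_py_alt
  simp only [foldlA_eq, foldlB_eq, List.nil_append]
  generalize hgen : max 1 (PySem.Int.floordiv duration_ms beat_ms) = n
  have hn1 : 1 ≤ n := hgen ▸ le_max_left _ _
  obtain ⟨m, hm⟩ : ∃ m : Nat, n = 0 + (m : Int) := ⟨n.toNat, by omega⟩
  rw [hm, merge_main]
  simp
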